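-- pv_equiv track=rewrite | github.com/NIRANJAN-PATIL-1811/python-basic-program | find_largest_number.py | find_largest_and_smallest_digits
-- ===== SOURCE A (Python) =====
-- def find_largest_and_smallest_digits(number):
--     # Convert the number to a string to iterate through its digits
--     number_str = str(number)
--
--     # Initialize variables to store the largest and smallest digits
--     largest_digit = smallest_digit = int(number_str[0])
--
--     # Iterate through the digits of the number
--     for digit_char in number_str:
--         digit = int(digit_char)
--
--         # Update the largest digit if the current digit is larger
--         if digit > largest_digit:
--             largest_digit = digit
--
--         # Update the smallest digit if the current digit is smaller
--         if digit < smallest_digit: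
--             smallest_digit = digit
--
--     return largest_digit, smallest_digit
-- ===== SOURCE B (Python) =====
-- def find_largest_and_smallest_digits(number):
--     digits = sorted(int(c) for c in str(number))
--     return digits[-1], digits[0]
-- ===== Notes on version B (the rewrite author's own statement) =====
-- stated objective: alternative
-- what changed: Replaces A's single pass that tracks running largest/smallest digits with building the digit list, sorting it ascending, and returning its last and first elements; Pre_ excludes negative numbers, on which both A and B raise ValueError while converting the sign character.
import Mathlib
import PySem

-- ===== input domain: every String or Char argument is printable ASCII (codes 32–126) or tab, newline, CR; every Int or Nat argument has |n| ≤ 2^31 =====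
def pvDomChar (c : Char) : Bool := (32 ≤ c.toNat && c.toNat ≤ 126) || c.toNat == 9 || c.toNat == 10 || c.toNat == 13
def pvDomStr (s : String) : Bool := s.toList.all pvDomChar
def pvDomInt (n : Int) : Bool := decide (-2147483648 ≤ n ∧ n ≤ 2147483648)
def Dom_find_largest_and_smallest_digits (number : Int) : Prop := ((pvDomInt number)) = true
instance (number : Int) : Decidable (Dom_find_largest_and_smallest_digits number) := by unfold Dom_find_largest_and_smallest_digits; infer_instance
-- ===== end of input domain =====

-- B replaces A's single-pass max/min tracking by building the digit list, sorting it,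
-- and taking its two ends (objective: alternative decomposition, same asymptotic cost on ≤ 10 digits).

-- ===== PORT A =====
-- int(c) for a single character c (exact where it returns; none = ValueError, excluded by Pre_)
def pvDigit (c : Char) : Int := (PySem.Int.ofChars? [c]).getD 0

def find_largest_and_smallest_digits (number : Int) : Int × Int :=
  let number_str := PySem.Int.toChars number
  -- largest_digit = smallest_digit = int(number_str[0]); str(number) is never empty
  let d0 := pvDigit (number_str.headD '0')
  number_str.foldl
    (fun acc digit_char =>
      let digit := pvDigit digit_char
      (if digit > acc.1 then digit else acc.1,
       if digit < acc.2 then digit else acc.2))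
    (d0, d0)

-- ===== PORT B =====
def find_largest_and_smallest_digits_alt (number : Int) : Int × Int :=
  let digits := PySem.List.sorted ((PySem.Int.toChars number).map pvDigit) (fun x => x) false
  ((PySem.List.pyGet? digits (-1)).getD 0, (PySem.List.pyGet? digits 0).getD 0)

-- ===== PRECONDITION & SPEC =====
-- A raises ValueError on negative numbers (converting the sign character fails); B raises there too.
def Pre_find_largest_and_smallest_digits (number : Int) : Prop := 0 ≤ number
instance (number : Int) : Decidable (Pre_find_largest_and_smallest_digits number) := by unfold Pre_find_largest_and_smallest_digits; infer_instance
def pvWitness_find_largest_and_smallest_digits : Int := 907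

def Spec_find_largest_and_smallest_digits (number : Int) (out : Int × Int) : Prop := out = find_largest_and_smallest_digits_alt number
instance (number : Int) (out : Int × Int) : Decidable (Spec_find_largest_and_smallest_digits number out) := by unfold Spec_find_largest_and_smallest_digits; infer_instance

-- ===== CLAIM (what is proved, stated in full; the proofs are below) =====
def Claim_equal_find_largest_and_smallest_digits : Prop := ∀ (number : Int), Dom_find_largest_and_smallest_digits number → Pre_find_largest_and_smallest_digits number → Spec_find_largest_and_smallest_digits number (find_largest_and_smallest_digits number)

-- ===== LEMMAS AND PROOFS =====

-- A's fold over the character list, with the digit of each char, splits into a max-fold and a min-fold.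
theorem pv_fold_split (cs : List Char) (a b : Int) :
    cs.foldl
      (fun acc digit_char =>
        let digit := pvDigit digit_char
        (if digit > acc.1 then digit else acc.1,
         if digit < acc.2 then digit else acc.2))
      (a, b)
    = ((cs.map pvDigit).foldl max a, (cs.map pvDigit).foldl min b) := by
  induction cs generalizing a b with
  | nil => simp
  | cons c t ih =>
      simp only [List.foldl_cons, List.map_cons]
      rw [ih]
      refine congrArg₂ Prod.mk ?_ ?_
      · congr 1
        rw [max_def]; split_ifs <;> omega
      · congr 1
        rw [min_def]; split_ifs <;> omega

-- the last element of a (· ≤ ·)-pairwise list bounds every element from above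
theorem pv_le_getLastD_of_pairwise (s : List Int) (h : s.Pairwise (· ≤ ·))
    (x : Int) (hx : x ∈ s) : x ≤ (s.getLast?).getD 0 := by
  rw [← List.head?_reverse]
  have hp : s.reverse.Pairwise (fun a b => b ≤ a) := List.pairwise_reverse.mpr h
  have hxr : x ∈ s.reverse := by simpa using hx
  cases hr : s.reverse with
  | nil => simp [hr] at hxr
  | cons m t =>
      rw [hr] at hp hxr
      rcases List.mem_cons.mp hxr with h1 | h2
      · simp [h1]
      · have := (List.pairwise_cons.mp hp).1 x h2
        simpa using this

-- the head of a (· ≤ ·)-pairwise list bounds every element from below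
theorem pv_headD_le_of_pairwise (s : List Int) (h : s.Pairwise (· ≤ ·))
    (x : Int) (hx : x ∈ s) : (s.head?).getD 0 ≤ x := by
  cases s with
  | nil => simp at hx
  | cons m t =>
      rcases List.mem_cons.mp hx with h1 | h2
      · simp [h1]
      · have := (List.pairwise_cons.mp h).1 x h2
        simpa using this

-- for a nonempty list ds, (foldl max d0, foldl min d0) with d0 = ds.head equals the two ends of sorted(ds)
theorem pv_extrema (d0 : Int) (t : List Int) :
    (d0 :: t).foldl max d0 = ((PySem.List.sorted (d0 :: t) (fun x => x) false).getLast?).getD 0 ∧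
    (d0 :: t).foldl min d0 = ((PySem.List.sorted (d0 :: t) (fun x => x) false).head?).getD 0 := by
  set ds := d0 :: t with hds
  set s := PySem.List.sorted ds (fun x => x) false with hs0
  have hperm : s.Perm ds := PySem.List.sorted_perm ds (fun x => x) false
  have hpw : s.Pairwise (· ≤ ·) := by
    simpa using PySem.List.sorted_pairwise ds (fun x => x)
  have hne : s ≠ [] := by
    intro h0
    have := hperm.length_eq
    simp [h0, hds] at this
  constructor
  · -- max side
    apply le_antisymm
    · have hmem : ds.foldl max d0 ∈ d0 :: ds := List.max?_mem rfl
      have hmem' : ds.foldl max d0 ∈ s := by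
        rw [PySem.List.mem_sorted]
        rcases List.mem_cons.mp hmem with h1 | h2
        · rw [h1, hds]; simp
        · exact h2
      exact pv_le_getLastD_of_pairwise s hpw _ hmem'
    · have hlmem : (s.getLast?).getD 0 ∈ s := by
        cases hsc : s with
        | nil => exact absurd hsc hne
        | cons m u =>
            have : (m :: u).getLast (by simp) ∈ m :: u := List.getLast_mem _
            simp [List.getLast?_eq_some_getLast, this]
      have hlds : (s.getLast?).getD 0 ∈ ds := (PySem.List.mem_sorted ds _ false _).mp hlmem
      exact (PySem.List.le_foldl_max ds d0).2 _ hlds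
  · -- min side
    apply le_antisymm
    · have hhmem : (s.head?).getD 0 ∈ s := by
        cases hsc : s with
        | nil => exact absurd hsc hne
        | cons m u => simp
      have hhds : (s.head?).getD 0 ∈ ds := (PySem.List.mem_sorted ds _ false _).mp hhmem
      exact (PySem.List.foldl_min_le ds d0).2 _ hhds
    · have hmem : ds.foldl min d0 ∈ d0 :: ds := List.min?_mem rfl
      have hmem' : ds.foldl min d0 ∈ s := by
        rw [PySem.List.mem_sorted]
        rcases List.mem_cons.mp hmem with h1 | h2
        · rw [h1, hds]; simp
        · exact h2
      exact pv_headD_le_of_pairwise s hpw _ hmem'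

-- str(number) is nonempty
theorem pv_toDigitsCore_ne_nil (b : Nat) : ∀ (f n : Nat) (l : List Char), l ≠ [] → Nat.toDigitsCore b f n l ≠ [] := by
  intro f
  induction f with
  | zero => intro n l h; simpa [Nat.toDigitsCore]
  | succ f ih =>
      intro n l h
      simp only [Nat.toDigitsCore]
      split
      · simp
      · exact ih _ _ (by simp)

theorem pv_toDigits_ne_nil (b n : Nat) : Nat.toDigits b n ≠ [] := by
  unfold Nat.toDigits
  simp only [Nat.toDigitsCore]
  split
  · simp
  · exact pv_toDigitsCore_ne_nil b _ _ _ (by simp)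

theorem pv_toChars_ne_nil (n : Int) : PySem.Int.toChars n ≠ [] := by
  unfold PySem.Int.toChars
  split
  · simp
  · exact pv_toDigits_ne_nil 10 _

-- ===== VERDICT (by name: the statement is the Claim_ definition above) =====
theorem find_largest_and_smallest_digits_spec : Claim_equal_find_largest_and_smallest_digits := by
  intro number _ _
  unfold Spec_find_largest_and_smallest_digits
  unfold find_largest_and_smallest_digits find_largest_and_smallest_digits_alt
  cases hcs : PySem.Int.toChars number with
  | nil => exact absurd hcs (pv_toChars_ne_nil number)
  | cons c t =>
      simp only [List.headD_cons]
      rw [pv_fold_split]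
      rw [PySem.List.pyGet?_neg_one, PySem.List.pyGet?_zero, ← List.head?_eq_getElem?]
      have := pv_extrema (pvDigit c) (t.map pvDigit)
      simp only [List.map_cons] at *
      exact Prod.ext this.1 this.2
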